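-- pv_equiv track=rewrite | github.com/pc5401/my_BOJ | 백준/Gold/1322. X와 K/X와 K.py | solve
-- ===== SOURCE A (Python) =====
-- def solve(X, K):
--     y = 0
--     p = 0
--     while K > 0:
--         if ((X >> p) & 1) == 0:
--             if K & 1:
--                 y |= (1 << p)
--             K >>= 1
--         p += 1
--     return y
-- ===== SOURCE B (Python) =====
-- def solve(X, K):
--     y = 0
--     mask = ~X  # ones exactly at the zero-bit positions of X (infinite two's complement)
--     while K > 0:
--         low = mask & -mask  # lowest remaining zero position of X
--         if K & 1:
--             y |= low
--         mask ^= low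
--         K >>= 1
--     return y
-- ===== Notes on version B (the rewrite author's own statement) =====
-- stated objective: alternative
-- what changed: Replaces A's per-position scan (explicit counter p testing every bit of X) with a maintained bitmask of X's zero positions: mask = ~X, and each of K's bits is deposited at low = mask & -mask, so the loop runs once per bit of K instead of once per bit position of X.
import Mathlib
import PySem

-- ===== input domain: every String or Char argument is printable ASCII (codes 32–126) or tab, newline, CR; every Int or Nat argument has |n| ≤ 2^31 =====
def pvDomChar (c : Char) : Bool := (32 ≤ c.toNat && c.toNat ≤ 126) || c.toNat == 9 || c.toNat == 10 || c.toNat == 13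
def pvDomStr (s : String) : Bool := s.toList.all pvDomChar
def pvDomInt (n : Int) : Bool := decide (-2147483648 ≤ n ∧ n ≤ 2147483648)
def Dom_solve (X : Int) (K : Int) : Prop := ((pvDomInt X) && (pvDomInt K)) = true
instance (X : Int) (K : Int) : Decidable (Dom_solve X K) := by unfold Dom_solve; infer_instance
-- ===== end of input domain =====

-- B deposits K's bits into X's zero positions by maintaining a bitmask of the remaining
-- holes (mask = ~X, low = mask & -mask) instead of A's explicit position counter p;
-- alternative decomposition, same return value on Pre_.

-- ===== PORT A =====
-- A's while-loop; `fuel` only makes the recursion total (the Python loop diverges for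
-- negative X when K has more bits than X has zero bits); 256 is enough for every input
-- satisfying Dom_solve ∧ Pre_solve, as the proof below shows.
def solveA_loop (X : Int) : Nat → Int → Nat → Int → Int
  | 0, y, _, _ => y
  | fuel+1, y, p, K =>
    if K > 0 then
      if PySem.Int.band (X >>> p) 1 = 0 then
        solveA_loop X fuel (if PySem.Int.band K 1 ≠ 0 then PySem.Int.bor y ((1:Int) <<< p) else y)
          (p+1) (K >>> (1:Nat))
      else
        solveA_loop X fuel y (p+1) K
    else y

def solve (X : Int) (K : Int) : Int := solveA_loop X 256 0 0 K

-- ===== PORT B =====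
-- termination of B's while-loop: K >>= 1 strictly shrinks a positive K
theorem pv_shiftRight_one_toNat_lt {K : Int} (h : 0 < K) : (K >>> (1:Nat)).toNat < K.toNat := by
  rw [Int.shiftRight_eq_div_pow]; omega

def solveB_loop (y mask K : Int) : Int :=
  if h : K > 0 then
    let low := PySem.Int.band mask (-mask)
    solveB_loop (if PySem.Int.band K 1 ≠ 0 then PySem.Int.bor y low else y)
      (PySem.Int.bxor mask low) (K >>> (1:Nat))
  else y
termination_by K.toNat
decreasing_by exact pv_shiftRight_one_toNat_lt h

def solve_alt (X : Int) (K : Int) : Int := solveB_loop 0 (Int.not X) K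

-- ===== PRECONDITION & SPEC =====
-- Pre_ excludes exactly the inputs on which the Python A never returns: negative X with a
-- positive K that has more bits than X has zero-bit positions (there A's scan for the next
-- zero bit of X loops forever); on every input where A returns, Pre_ holds.
def Pre_solve (X : Int) (K : Int) : Prop :=
  K ≤ 0 ∨ 0 ≤ X ∨ PySem.Int.bitLength K ≤ PySem.Int.bitCount (Int.not X)
instance (X : Int) (K : Int) : Decidable (Pre_solve X K) := by unfold Pre_solve; infer_instance
def pvWitness_solve : Int × Int := (5, 3)

def Spec_solve (X : Int) (K : Int) (out : Int) : Prop := out = solve_alt X K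
instance (X : Int) (K : Int) (out : Int) : Decidable (Spec_solve X K out) := by unfold Spec_solve; infer_instance

-- ===== CLAIM (what is proved, stated in full; the proofs are below) =====
def Claim_equal_solve : Prop := ∀ (X : Int) (K : Int), Dom_solve X K → Pre_solve X K → Spec_solve X K (solve X K)

-- ===== LEMMAS AND PROOFS =====

-- bit-level Nat facts behind B's mask evolution
theorem pv_land_two_mul (x y : Nat) : (2*x) &&& (2*y+1) = 2*(x &&& y) := by
  apply Nat.eq_of_testBit_eq
  intro i
  cases i with
  | zero => simp [Nat.testBit_zero]
  | succ i =>
    rw [Nat.testBit_and, Nat.testBit_succ, Nat.testBit_succ, Nat.testBit_succ]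
    have h1 : 2*x/2 = x := by omega
    have h2 : (2*y+1)/2 = y := by omega
    have h3 : 2*(x&&&y)/2 = x&&&y := by omega
    rw [h1, h2, h3, Nat.testBit_and]

theorem pv_xor_two_mul (x y : Nat) : (2*x+1) ^^^ (2*y) = 2*(x ^^^ y) + 1 := by
  apply Nat.eq_of_testBit_eq
  intro i
  cases i with
  | zero => simp [Nat.testBit_zero]
  | succ i =>
    rw [Nat.testBit_xor, Nat.testBit_succ, Nat.testBit_succ, Nat.testBit_succ]
    have h1 : (2*x+1)/2 = x := by omega
    have h2 : (2*y)/2 = y := by omega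
    have h3 : (2*(x^^^y)+1)/2 = x^^^y := by omega
    rw [h1, h2, h3, Nat.testBit_xor]

-- N & (N-1) clears the lowest set bit of N = (2m+1)·2^p
theorem pv_clear_lowest (m p : Nat) :
    ((2*m+1)*2^p) &&& ((2*m+1)*2^p - 1) = (2*m)*2^p := by
  induction p with
  | zero =>
    simp only [pow_zero, mul_one]
    apply Nat.eq_of_testBit_eq
    intro i
    cases i with
    | zero => simp [Nat.testBit_zero]
    | succ i =>
      rw [Nat.testBit_and, Nat.testBit_succ, Nat.testBit_succ, Nat.testBit_succ]
      have h1 : (2*m+1)/2 = m := by omega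
      have h2 : (2*m+1-1)/2 = m := by omega
      have h3 : (2*m)/2 = m := by omega
      rw [h1, h2, h3, Bool.and_self]
  | succ p ih =>
    have hpos : 1 ≤ (2*m+1)*2^p := Nat.one_le_iff_ne_zero.mpr (by positivity)
    have e2 : (2*m+1)*2^(p+1) - 1 = 2*((2*m+1)*2^p - 1) + 1 := by
      have : (2*m+1)*2^(p+1) = 2*((2*m+1)*2^p) := by ring
      omega
    have e1 : (2*m+1)*2^(p+1) = 2*((2*m+1)*2^p) := by ring
    rw [e2, e1, pv_land_two_mul, ih]; ring

-- (N-1) ^ 2^p re-sets bit p when N = (2m+1)·2^p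
theorem pv_xor_low (m p : Nat) :
    ((2*m+1)*2^p - 1) ^^^ 2^p = (2*m+2)*2^p - 1 := by
  induction p with
  | zero =>
    simp only [pow_zero, mul_one]
    apply Nat.eq_of_testBit_eq
    intro i
    cases i with
    | zero => simp [Nat.testBit_zero]
    | succ i =>
      rw [Nat.testBit_xor, Nat.testBit_succ, Nat.testBit_succ, Nat.testBit_succ]
      have h1 : (2*m+1-1)/2 = m := by omega
      have h2 : (1:Nat)/2 = 0 := by omega
      have h3 : (2*m+2-1)/2 = m := by omega
      rw [h1, h2, h3]
      simp
  | succ p ih =>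
    have hpos : 1 ≤ (2*m+1)*2^p := Nat.one_le_iff_ne_zero.mpr (by positivity)
    have hpos2 : 1 ≤ (2*m+2)*2^p := Nat.one_le_iff_ne_zero.mpr (by positivity)
    have e1 : (2*m+1)*2^(p+1) - 1 = 2*((2*m+1)*2^p - 1) + 1 := by
      have : (2*m+1)*2^(p+1) = 2*((2*m+1)*2^p) := by ring
      omega
    have e2 : (2:Nat)^(p+1) = 2*2^p := by ring
    rw [e1, e2, pv_xor_two_mul, ih]
    have e4 : (2*m+2)*(2*2^p) = 2*((2*m+2)*2^p) := by ring
    rw [e4]; omega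

-- B's `mask & -mask` on the invariant mask -((2m+1)·2^p) is exactly 2^p (Python's
-- infinite two's complement, evaluated through PySem.Int.band's sign cases)
theorem pv_low_eval (m p : Nat) :
    PySem.Int.band (-(((2*m+1)*2^p : Nat) : Int)) (-(-(((2*m+1)*2^p : Nat) : Int))) = ((2^p : Nat) : Int) := by
  have hN1 : 1 ≤ (2*m+1)*2^p := Nat.one_le_iff_ne_zero.mpr (by positivity)
  rw [neg_neg, PySem.Int.band]
  rw [if_neg (by omega), if_pos (by omega)]
  have h1 : (-(-(((2*m+1)*2^p : Nat) : Int)) - 1) = (((2*m+1)*2^p - 1 : Nat) : Int) := by omega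
  rw [h1, Int.toNat_natCast, Int.toNat_natCast, pv_clear_lowest]
  congr 1
  exact Nat.sub_eq_of_eq_add (by ring)

-- B's `mask ^= low` advances the invariant mask from position p to p+1
theorem pv_bxor_eval (m p : Nat) :
    PySem.Int.bxor (-(((2*m+1)*2^p : Nat) : Int)) (((2^p : Nat) : Int)) = -(((m+1)*2^(p+1) : Nat) : Int) := by
  have hN1 : 1 ≤ (2*m+1)*2^p := Nat.one_le_iff_ne_zero.mpr (by positivity)
  have h3 : 1 ≤ (2*m+2)*2^p := Nat.one_le_iff_ne_zero.mpr (by positivity)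
  rw [PySem.Int.bxor]
  rw [if_neg (by omega), if_pos (by positivity)]
  have h1 : (-(-(((2*m+1)*2^p : Nat) : Int)) - 1) = (((2*m+1)*2^p - 1 : Nat) : Int) := by omega
  rw [h1, Int.toNat_natCast, Int.toNat_natCast, pv_xor_low]
  rw [show ((m+1)*2^(p+1)) = (2*m+2)*2^p from by ring, Nat.cast_sub h3]
  push_cast
  ring

-- the loop correspondence: A at position p with enough fuel equals B on the mask of
-- the holes of x at positions ≥ p, i.e. mask = -((x>>p + 1)·2^p)
theorem pv_main (x : Nat) : ∀ (fuel : Nat) (p : Nat) (K y : Int),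
    (x.size - p) + PySem.Int.bitLength K < fuel →
    solveA_loop (↑x) fuel y p K = solveB_loop y (-(((x >>> p + 1) * 2^p : Nat) : Int)) K := by
  intro fuel
  induction fuel with
  | zero => intro p K y h; omega
  | succ f ih =>
    intro p K y hfuel
    by_cases hK : K > 0
    · have hbl := PySem.Int.bitLength_of_pos hK
      have hfd : (K >>> (1:Nat)) = PySem.Int.floordiv K 2 := by
        rw [Int.shiftRight_eq_div_pow, PySem.Int.floordiv_eq_ediv_of_pos (by norm_num)]
        norm_num
      have hshift : ((x:Int) >>> p) = ((x >>> p : Nat) : Int) := rfl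
      have hband : PySem.Int.band ((x:Int) >>> p) 1 = (((x >>> p) &&& 1 : Nat) : Int) := by
        rw [hshift]
        exact_mod_cast PySem.Int.band_natCast (x >>> p) 1
      rw [solveA_loop, if_pos hK]
      by_cases ha : (x >>> p) % 2 = 0
      · -- bit p of x is 0: A consumes a bit of K, B steps once on hole 2^p
        obtain ⟨m, hm⟩ : ∃ m, x >>> p = 2*m := ⟨(x >>> p)/2, by omega⟩
        have hc : PySem.Int.band ((x:Int) >>> p) 1 = 0 := by
          rw [hband, Nat.and_one_is_mod, ha]; rfl
        rw [if_pos hc]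
        rw [solveB_loop, dif_pos hK]
        rw [show ((x >>> p + 1) * 2^p) = (2*m+1)*2^p from by rw [hm]]
        simp only []
        rw [pv_low_eval, pv_bxor_eval]
        rw [show ((1:Int) <<< p) = ((2^p : Nat) : Int) from by
          show Int.ofNat (1 <<< p) = _; simp [Nat.one_shiftLeft]]
        have hnext : x >>> (p+1) + 1 = m + 1 := by
          rw [Nat.shiftRight_succ, hm]; omega
        have := ih (p+1) (K >>> (1:Nat))
          (if PySem.Int.band K 1 ≠ 0 then PySem.Int.bor y ((2^p : Nat) : Int) else y)
          (by rw [hfd]; omega)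
        rw [hnext] at this
        exact this
      · -- bit p of x is 1: A skips; B's mask is unchanged when read at p+1
        obtain ⟨m, hm⟩ : ∃ m, x >>> p = 2*m+1 := ⟨(x >>> p)/2, by omega⟩
        have hc : ¬ PySem.Int.band ((x:Int) >>> p) 1 = 0 := by
          rw [hband, Nat.and_one_is_mod]
          exact fun h => ha (by exact_mod_cast h)
        rw [if_neg hc]
        have hplt : p < x.size := by
          by_contra hge
          have hx : x < 2^p := Nat.size_le.mp (by omega)
          have : x >>> p = 0 := by rw [Nat.shiftRight_eq_div_pow]; exact Nat.div_eq_of_lt hx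
          omega
        have hmask : (x >>> p + 1) * 2^p = (x >>> (p+1) + 1) * 2^(p+1) := by
          rw [Nat.shiftRight_succ, hm]
          rw [show (2*m+1)/2 = m from by omega]
          ring
        rw [hmask]
        exact ih (p+1) K y (by omega)
    · rw [solveA_loop, if_neg hK, solveB_loop, dif_neg hK]

-- xor clears a set bit p of N = (2m+1)·2^p
theorem pv_xor_clear (m p : Nat) : ((2*m+1)*2^p) ^^^ 2^p = (2*m)*2^p := by
  induction p with
  | zero =>
    simp only [pow_zero, mul_one]
    apply Nat.eq_of_testBit_eq
    intro i
    cases i with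
    | zero => simp [Nat.testBit_zero]; omega
    | succ i =>
      rw [Nat.testBit_xor, Nat.testBit_succ, Nat.testBit_succ, Nat.testBit_succ]
      have h1 : (2*m+1)/2 = m := by omega
      have h2 : (1:Nat)/2 = 0 := by omega
      have h3 : (2*m)/2 = m := by omega
      rw [h1, h2, h3]
      simp
  | succ p ih =>
    have e1 : (2*m+1)*2^(p+1) = 2*((2*m+1)*2^p) := by ring
    have e2 : (2:Nat)^(p+1) = 2*2^p := by ring
    rw [e1, e2]
    have hx : (2*((2*m+1)*2^p)) ^^^ (2*2^p) = 2*(((2*m+1)*2^p) ^^^ 2^p) := by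
      apply Nat.eq_of_testBit_eq
      intro i
      cases i with
      | zero => simp [Nat.testBit_zero]
      | succ i =>
        rw [Nat.testBit_xor, Nat.testBit_succ, Nat.testBit_succ, Nat.testBit_succ]
        have h1 : 2*((2*m+1)*2^p)/2 = (2*m+1)*2^p := by omega
        have h2 : 2*2^p/2 = 2^p := by omega
        have h3 : 2*(((2*m+1)*2^p) ^^^ 2^p)/2 = ((2*m+1)*2^p) ^^^ 2^p := by omega
        rw [h1, h2, h3, Nat.testBit_xor]
    rw [hx, ih]; ring

theorem pv_band_negSucc_one (t : Nat) :
    PySem.Int.band (Int.negSucc t) 1 = ((1 - (1 &&& t) : Nat) : Int) := by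
  rw [PySem.Int.band]
  rw [if_neg (by omega), if_pos (by norm_num)]
  have h : (-Int.negSucc t - 1) = (t : Nat) := by
    rw [Int.negSucc_eq]; ring
  rw [h, Int.toNat_natCast]
  rfl

theorem pv_low_eval_pos (m p : Nat) :
    PySem.Int.band (((2*m+1)*2^p : Nat) : Int) (-(((2*m+1)*2^p : Nat) : Int)) = ((2^p : Nat) : Int) := by
  have hN1 : 1 ≤ (2*m+1)*2^p := Nat.one_le_iff_ne_zero.mpr (by positivity)
  rw [PySem.Int.band]
  rw [if_pos (by positivity), if_neg (by omega)]
  have h1 : (-(-(((2*m+1)*2^p : Nat) : Int)) - 1) = (((2*m+1)*2^p - 1 : Nat) : Int) := by omega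
  rw [h1, Int.toNat_natCast, Int.toNat_natCast, pv_clear_lowest]
  congr 1
  exact Nat.sub_eq_of_eq_add (by ring)

theorem pv_bxor_eval_pos (m p : Nat) :
    PySem.Int.bxor (((2*m+1)*2^p : Nat) : Int) (((2^p : Nat) : Int)) = (((2*m)*2^p : Nat) : Int) := by
  rw [PySem.Int.bxor]
  rw [if_pos (by positivity), if_pos (by positivity)]
  rw [Int.toNat_natCast, Int.toNat_natCast, pv_xor_clear]

theorem pv_main_neg (n : Nat) : ∀ (fuel : Nat) (p : Nat) (K y : Int),
    (n.size - p) + PySem.Int.bitLength K < fuel →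
    PySem.Int.bitLength K ≤ PySem.Int.bitCount ((n >>> p : Nat) : Int) →
    solveA_loop (Int.negSucc n) fuel y p K = solveB_loop y (((n >>> p) * 2^p : Nat) : Int) K := by
  intro fuel
  induction fuel with
  | zero => intro p K y h _; omega
  | succ f ih =>
    intro p K y hfuel hcnt
    by_cases hK : K > 0
    · have hbl := PySem.Int.bitLength_of_pos hK
      have hfd : (K >>> (1:Nat)) = PySem.Int.floordiv K 2 := by
        rw [Int.shiftRight_eq_div_pow, PySem.Int.floordiv_eq_ediv_of_pos (by norm_num)]
        norm_num
      have ht0 : n >>> p ≠ 0 := by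
        intro h0
        rw [h0] at hcnt
        have : PySem.Int.bitCount ((0:Nat) : Int) = 0 := PySem.Int.bitCount_zero
        omega
      have hplt : p < n.size := by
        by_contra hge
        have hx : n < 2^p := Nat.size_le.mp (by omega)
        exact ht0 (by rw [Nat.shiftRight_eq_div_pow]; exact Nat.div_eq_of_lt hx)
      have hshift : ((Int.negSucc n) >>> p) = Int.negSucc (n >>> p) := rfl
      have hcntstep := PySem.Int.bitCount_natCast (m := n >>> p) (Nat.pos_of_ne_zero ht0)
      rw [solveA_loop, if_pos hK, hshift, pv_band_negSucc_one]
      by_cases ha : (n >>> p) % 2 = 1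
      · -- bit p of ~X is 1 (a hole of X): A consumes, B steps once
        obtain ⟨m, hm⟩ : ∃ m, n >>> p = 2*m+1 := ⟨(n >>> p)/2, by omega⟩
        have hc : ((1 - (1 &&& (n >>> p)) : Nat) : Int) = 0 := by
          rw [Nat.land_comm, Nat.and_one_is_mod, ha]
          norm_num
        rw [if_pos hc]
        rw [solveB_loop, dif_pos hK]
        rw [show ((n >>> p) * 2^p) = (2*m+1)*2^p from by rw [hm]]
        simp only []
        rw [pv_low_eval_pos, pv_bxor_eval_pos]
        rw [show ((1:Int) <<< p) = ((2^p : Nat) : Int) from by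
          show Int.ofNat (1 <<< p) = _; simp [Nat.one_shiftLeft]]
        have hnext : n >>> (p+1) = m := by rw [Nat.shiftRight_succ, hm]; omega
        have hdiv : (n >>> p)/2 = m := by omega
        have hc2 : PySem.Int.bitCount ((n >>> p : Nat) : Int) = 1 + PySem.Int.bitCount ((m : Nat) : Int) := by
          rw [ha, hdiv] at hcntstep; omega
        have hfuel2 : (n.size - (p+1)) + PySem.Int.bitLength (PySem.Int.floordiv K 2) < f := by
          clear hc2 hdiv hcntstep ht0 hshift ih hm ha hcnt hnext
          omega
        have hcnt2 : PySem.Int.bitLength (PySem.Int.floordiv K 2) ≤ PySem.Int.bitCount ((n >>> (p+1) : Nat) : Int) := by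
          rw [hnext]
          clear hdiv hcntstep ht0 hshift ih hm ha hfuel hfuel2 hnext
          omega
        have := ih (p+1) (K >>> (1:Nat))
          (if PySem.Int.band K 1 ≠ 0 then PySem.Int.bor y ((2^p : Nat) : Int) else y)
          (by rw [hfd]; exact hfuel2) (by rw [hfd]; exact hcnt2)
        rw [hnext] at this
        rw [show ((2*m)*2^p) = m * 2^(p+1) from by ring]
        exact this
      · -- bit p of ~X is 0 (a one-bit of X): A skips, B's mask unchanged at p+1
        obtain ⟨m, hm⟩ : ∃ m, n >>> p = 2*m := ⟨(n >>> p)/2, by omega⟩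
        have hc : ¬ ((1 - (1 &&& (n >>> p)) : Nat) : Int) = 0 := by
          rw [Nat.land_comm, Nat.and_one_is_mod, show (n >>> p) % 2 = 0 from by omega]
          norm_num
        rw [if_neg hc]
        have hnext : n >>> (p+1) = m := by rw [Nat.shiftRight_succ, hm]; omega
        have hdiv : (n >>> p)/2 = m := by omega
        have hc2 : PySem.Int.bitCount ((n >>> p : Nat) : Int) = PySem.Int.bitCount ((m : Nat) : Int) := by
          rw [show (n >>> p) % 2 = 0 from by omega, hdiv] at hcntstep; omega
        have hfuel2 : (n.size - (p+1)) + PySem.Int.bitLength K < f := by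
          clear hc2 hdiv hcntstep ht0 hshift ih hm hcnt hnext hbl
          omega
        have hcnt2 : PySem.Int.bitLength K ≤ PySem.Int.bitCount ((n >>> (p+1) : Nat) : Int) := by
          rw [hnext]
          clear hdiv hcntstep ht0 hshift ih hm hfuel hfuel2 hnext hbl
          omega
        have := ih (p+1) K y hfuel2 hcnt2
        rw [hnext] at this
        rw [show ((n >>> p) * 2^p) = m * 2^(p+1) from by rw [hm]; ring]
        exact this
    · rw [solveA_loop, if_neg hK, solveB_loop, dif_neg hK]

-- ===== VERDICT (by name: the statement is the Claim_ definition above) =====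
theorem solve_spec : Claim_equal_solve := by
  intro X K hD hP
  unfold Spec_solve
  by_cases hK : K ≤ 0
  · rw [solve, solve_alt]
    rw [show (256:Nat) = 255+1 from rfl, solveA_loop, if_neg (by omega), solveB_loop,
      dif_neg (by omega)]
  · unfold Dom_solve pvDomInt at hD
    simp only [Bool.and_eq_true, decide_eq_true_eq] at hD
    have hKb : PySem.Int.bitLength K ≤ 32 := by
      by_contra h33
      have htw := PySem.Int.two_pow_bitLength_le K (by omega)
      have h1 : (2:Nat)^32 ≤ 2^(PySem.Int.bitLength K - 1) :=
        Nat.pow_le_pow_right (by norm_num) (by omega)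
      have h2 : K.natAbs ≤ 2147483648 := by omega
      omega
    by_cases hX : 0 ≤ X
    · lift X to Nat using hX with x
      have hsize : x.size ≤ 32 := Nat.size_le.mpr (by
        have : (x:Int) ≤ 2147483648 := hD.1.2
        have : x ≤ 2147483648 := by exact_mod_cast this
        omega)
      show solveA_loop (↑x) 256 0 0 K = solveB_loop 0 (Int.not ↑x) K
      have hnot : Int.not ((x:Int)) = -(((x >>> 0 + 1) * 2^0 : Nat) : Int) := by
        show Int.negSucc x = _
        simp [Int.negSucc_eq]
      rw [hnot]
      exact pv_main x 256 0 K 0 (by omega)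
    · -- X < 0: A terminates because K's bits fit into X's zero positions (third disjunct)
      have hcntX : PySem.Int.bitLength K ≤ PySem.Int.bitCount (Int.not X) := by
        rcases hP with h | h | h
        · omega
        · exact absurd h hX
        · exact h
      cases X with
      | ofNat x => exact absurd (Int.natCast_nonneg x) hX
      | negSucc n =>
        have hsize : n.size ≤ 31 := Nat.size_le.mpr (by
          have h1 : (-2147483648 : Int) ≤ Int.negSucc n := hD.1.1
          rw [Int.negSucc_eq] at h1
          have : n ≤ 2147483647 := by omega
          omega)
        show solveA_loop (Int.negSucc n) 256 0 0 K = solveB_loop 0 (Int.not (Int.negSucc n)) K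
        have hnot : Int.not (Int.negSucc n) = ((n : Nat) : Int) := rfl
        have hcnt0 : PySem.Int.bitLength K ≤ PySem.Int.bitCount ((n >>> 0 : Nat) : Int) := by
          rw [hnot] at hcntX
          simpa using hcntX
        have hmask0 : Int.not (Int.negSucc n) = (((n >>> 0) * 2^0 : Nat) : Int) := by
          rw [hnot]; simp
        rw [hmask0]
        exact pv_main_neg n 256 0 K 0 (by omega) hcnt0
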